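-- pv_equiv track=rewrite | github.com/sjdv1982/nucleotide-fragment-pipeline | parse_mmcif_header.py | _parseOperationSubExpression
-- ===== SOURCE A (Python) =====
-- def _parseOperationSubExpression(expression) -> list[int]:
--     expression = expression.strip()
--     operations = []
--     if expression.find(",") > -1:
--         # comma-separated list of expressions
--         terms = expression.split(",")
--         for term in terms:
--             operations += _parseOperationSubExpression(term)
--     elif expression.find("-") > -1:
--         # range
--         start, end = expression.split("-")
--         start = int(start)
--         end = int(end)
--         for n in range(start, end + 1):
--             operations.append(str(n))
--     else:
--         # single operation
--         operations = [expression]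
--     return operations
-- ===== SOURCE B (Python) =====
-- def _parseOperationSubExpression(expression) -> list[int]:
--     operations = []
--     for term in expression.strip().split(","):
--         term = term.strip()
--         if "-" in term:
--             start, end = term.split("-")
--             operations.extend(str(n) for n in range(int(start), int(end) + 1))
--         else:
--             operations.append(term)
--     return operations
-- ===== Notes on version B (the rewrite author's own statement) =====
-- stated objective: simpler
-- what changed: Replaces A's recursion (comma branch calls itself on each term) with a single non-recursive loop over the comma-split terms, stripping each term and handling the range/single cases inline with extend/append.
import Mathlib
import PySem

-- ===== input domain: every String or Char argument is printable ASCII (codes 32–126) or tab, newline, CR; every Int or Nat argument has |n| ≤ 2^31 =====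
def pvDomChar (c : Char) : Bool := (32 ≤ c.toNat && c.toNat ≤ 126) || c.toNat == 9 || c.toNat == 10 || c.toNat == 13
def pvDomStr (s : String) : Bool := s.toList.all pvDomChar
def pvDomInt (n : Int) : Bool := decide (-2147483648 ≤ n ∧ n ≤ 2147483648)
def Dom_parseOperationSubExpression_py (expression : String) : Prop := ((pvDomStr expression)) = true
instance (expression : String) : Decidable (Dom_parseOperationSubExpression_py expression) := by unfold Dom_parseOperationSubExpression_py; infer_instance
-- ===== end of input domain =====

-- B replaces A's recursion over comma terms by a single non-recursive loop over the comma-split terms (objective: simpler).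


-- ===== PORT A =====
-- A's recursion, with a fuel guard that only makes the same computation total:
-- the comma branch recurses on pieces of split(','), which contain no ',', so the
-- recursion never goes past depth 2 and fuel 2 is always enough.
def pvGoA : Nat → String → List String
  | 0, _ => []
  | fuel+1, expression =>
    let e := PySem.Str.strip expression
    if PySem.Str.find e "," > -1 then
      -- comma-separated list of expressions
      ((PySem.Str.split? e ",").getD []).foldl (fun operations term => operations ++ pvGoA fuel term) []
    else if PySem.Str.find e "-" > -1 then
      -- range
      match (PySem.Str.split? e "-").getD [] with
      | [s0, e0] =>
        match PySem.Int.ofStr? s0, PySem.Int.ofStr? e0 with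
        | some istart, some iend =>
          (PySem.List.pyRange istart (iend + 1) 1).foldl (fun operations n => operations ++ [PySem.Int.toStr n]) []
        | _, _ => []  -- int() raises ValueError in Python: outside Pre_
      | _ => []       -- unpacking raises ValueError in Python: outside Pre_
    else
      -- single operation
      [e]

def parseOperationSubExpression_py (expression : String) : List String := pvGoA 2 expression

-- ===== PORT B =====
def parseOperationSubExpression_py_alt (expression : String) : List String :=
  ((PySem.Str.split? (PySem.Str.strip expression) ",").getD []).foldl
    (fun operations t =>
      let term := PySem.Str.strip t
      if PySem.Str.isIn "-" term then
        match (PySem.Str.split? term "-").getD [] with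
        | [sstart, send] =>
          match PySem.Int.ofStr? sstart, PySem.Int.ofStr? send with
          | some istart, some iend =>
            operations ++ (PySem.List.pyRange istart (iend + 1) 1).map PySem.Int.toStr
          | _, _ => operations  -- int() raises ValueError in Python: outside Pre_
        | _ => operations       -- unpacking raises ValueError in Python: outside Pre_
      else operations ++ [term]) []

-- ===== PRECONDITION & SPEC =====
-- Pre_ excludes exactly the inputs on which Python A raises ValueError: a comma term
-- containing '-' whose '-'-split is not exactly two int()-parseable pieces.
def pvTermOk (t : String) : Bool :=
  let s := PySem.Str.strip t
  if PySem.Str.isIn "-" s then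
    match (PySem.Str.split? s "-").getD [] with
    | [a, b] => (PySem.Int.ofStr? a).isSome && (PySem.Int.ofStr? b).isSome
    | _ => false
  else true

def Pre_parseOperationSubExpression_py (expression : String) : Prop :=
  ((PySem.Str.split? (PySem.Str.strip expression) ",").getD []).all pvTermOk = true
instance (expression : String) : Decidable (Pre_parseOperationSubExpression_py expression) := by unfold Pre_parseOperationSubExpression_py; infer_instance

def pvWitness_parseOperationSubExpression_py : String := "0-2, x"

def Spec_parseOperationSubExpression_py (expression : String) (out : List String) : Prop := out = parseOperationSubExpression_py_alt expression
instance (expression : String) (out : List String) : Decidable (Spec_parseOperationSubExpression_py expression out) := by unfold Spec_parseOperationSubExpression_py; infer_instance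

-- ===== CLAIM (what is proved, stated in full; the proofs are below) =====
def Claim_equal_parseOperationSubExpression_py : Prop := ∀ (expression : String), Dom_parseOperationSubExpression_py expression → Pre_parseOperationSubExpression_py expression → Spec_parseOperationSubExpression_py expression (parseOperationSubExpression_py expression)

-- ===== LEMMAS AND PROOFS =====

-- what B's loop body appends for one comma term
def pvChunk (t : String) : List String :=
  let term := PySem.Str.strip t
  if PySem.Str.isIn "-" term then
    match (PySem.Str.split? term "-").getD [] with
    | [sstart, send] =>
      match PySem.Int.ofStr? sstart, PySem.Int.ofStr? send with
      | some istart, some iend => (PySem.List.pyRange istart (iend + 1) 1).map PySem.Int.toStr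
      | _, _ => []
    | _ => []
  else [term]

theorem pv_singleton_infix_iff (c : Char) (l : List Char) : [c] <:+: l ↔ c ∈ l := by
  constructor
  · intro h; exact List.singleton_sublist.mp h.sublist
  · intro h
    obtain ⟨s, t, rfl⟩ := List.append_of_mem h
    exact ⟨s, t, by simp⟩

theorem pv_find_pos_iff (s sub : String) : PySem.Str.find s sub > -1 ↔ sub.toList <:+: s.toList := by
  rw [PySem.Str.find_eq]
  constructor
  · intro h
    by_contra hn
    rw [← PySem.Chars.find_eq_neg_one_iff] at hn
    omega
  · intro h
    have h1 := PySem.Chars.neg_one_le_find s.toList sub.toList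
    have h2 : PySem.Chars.find s.toList sub.toList ≠ -1 := by
      rw [Ne, PySem.Chars.find_eq_neg_one_iff]; exact fun hh => hh h
    omega

theorem pv_go_nil_eq (sep : List Char) (n : Nat) (cur : List Char) (acc : List (List Char)) :
    PySem.Chars.splitOn.go sep (n + 1) [] cur acc = (cur.reverse :: acc).reverse := by
  rw [PySem.Chars.splitOn.go]
  omega

theorem pv_go_cons_eq (sep : List Char) (n : Nat) (c : Char) (rest cur : List Char) (acc : List (List Char)) :
    PySem.Chars.splitOn.go sep (n + 1) (c :: rest) cur acc =
      if sep.isPrefixOf (c :: rest) = true then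
        PySem.Chars.splitOn.go sep n (List.drop sep.length (c :: rest)) [] (cur.reverse :: acc)
      else PySem.Chars.splitOn.go sep n rest (c :: cur) acc := by
  rw [PySem.Chars.splitOn.go]

theorem pv_go_not_mem (c : Char) : ∀ (fuel : Nat) (l cur : List Char) (acc : List (List Char)) (p : List Char),
    l.length < fuel → (∀ q ∈ acc, c ∉ q) → c ∉ cur →
    p ∈ PySem.Chars.splitOn.go [c] fuel l cur acc → c ∉ p := by
  intro fuel
  induction fuel with
  | zero => intro l cur acc p h; omega
  | succ n ih =>
    intro l cur acc p hlen hacc hcur hp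
    cases l with
    | nil =>
      rw [pv_go_nil_eq] at hp
      simp only [List.mem_reverse, List.mem_cons] at hp
      rcases hp with rfl | hp
      · simp only [List.mem_reverse]; exact hcur
      · exact hacc _ hp
    | cons c' rest =>
      rw [pv_go_cons_eq] at hp
      by_cases hc : [c].isPrefixOf (c' :: rest) = true
      · rw [if_pos hc] at hp
        simp only [List.length_cons, List.drop_succ_cons] at hp
        refine ih _ _ _ _ (by simp at hlen ⊢; omega) ?_ (by simp) hp
        intro q hq
        simp only [List.mem_cons] at hq
        rcases hq with rfl | hq
        · simp only [List.mem_reverse]; exact hcur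
        · exact hacc _ hq
      · rw [if_neg hc] at hp
        have hcc : c ≠ c' := by
          intro h; subst h; simp [List.isPrefixOf] at hc
        refine ih _ _ _ _ (by simp at hlen ⊢; omega) hacc ?_ hp
        simp only [List.mem_cons, not_or]
        exact ⟨hcc, hcur⟩

theorem pv_go_no_occ (c : Char) : ∀ (fuel : Nat) (l cur : List Char) (acc : List (List Char)),
    l.length < fuel → c ∉ l →
    PySem.Chars.splitOn.go [c] fuel l cur acc = ((cur.reverse ++ l) :: acc).reverse := by
  intro fuel
  induction fuel with
  | zero => intro l cur acc h; omega
  | succ n ih =>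
    intro l cur acc hlen hnot
    cases l with
    | nil => rw [pv_go_nil_eq]; simp
    | cons c' rest =>
      rw [pv_go_cons_eq]
      have hcc : c ≠ c' := by
        intro h; subst h; simp at hnot
      have hpre : [c].isPrefixOf (c' :: rest) = false := by
        simp [List.isPrefixOf, hcc]
      rw [if_neg (by simp [hpre])]
      rw [ih rest (c' :: cur) acc (by simp at hlen ⊢; omega) (by simp at hnot; tauto)]
      simp

theorem pv_splitOn_not_mem {c : Char} {s p : List Char} (hp : p ∈ PySem.Chars.splitOn s [c]) : c ∉ p := by
  unfold PySem.Chars.splitOn at hp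
  exact pv_go_not_mem c (s.length + 1) s [] [] p (by omega) (by simp) (by simp) hp

theorem pv_splitOn_no_occ {c : Char} {s : List Char} (h : c ∉ s) : PySem.Chars.splitOn s [c] = [s] := by
  unfold PySem.Chars.splitOn
  rw [pv_go_no_occ c (s.length + 1) s [] [] (by omega) h]
  simp

theorem pv_strip_sublist (s : List Char) : (PySem.Chars.strip s).Sublist s := by
  unfold PySem.Chars.strip PySem.Chars.rstrip PySem.Chars.lstrip
  have h1 : (List.dropWhile PySem.Chars.isspace ((List.dropWhile PySem.Chars.isspace s).reverse)).Sublist ((List.dropWhile PySem.Chars.isspace s).reverse) := List.dropWhile_sublist _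
  have h2 := h1.reverse
  simp only [List.reverse_reverse] at h2
  exact h2.trans (List.dropWhile_sublist _)

theorem pv_dropWhile_idem (p : Char → Bool) (l : List Char) :
    List.dropWhile p (List.dropWhile p l) = List.dropWhile p l := by
  induction l with
  | nil => rfl
  | cons a t ih =>
    by_cases hpa : p a = true
    · simp [hpa, ih]
    · simp [hpa]

theorem pv_dropWhile_eq_self {p : Char → Bool} {a : Char} {l : List Char}
    (h : List.dropWhile p (a :: l) = a :: l) : p a = false := by
  by_contra hpa
  have hpa' : p a = true := by cases hh : p a <;> simp [hh] at hpa ⊢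
  rw [List.dropWhile_cons, if_pos hpa'] at h
  have := (List.dropWhile_sublist (l := l) p).length_le
  rw [h] at this
  simp at this

theorem pv_strip_idem (s : List Char) : PySem.Chars.strip (PySem.Chars.strip s) = PySem.Chars.strip s := by
  unfold PySem.Chars.strip PySem.Chars.rstrip PySem.Chars.lstrip
  set p := PySem.Chars.isspace with hp
  set u := List.dropWhile p s with hu
  have hud : List.dropWhile p u = u := by rw [hu]; exact pv_dropWhile_idem p s
  set v := (List.dropWhile p u.reverse).reverse with hv
  have hvu : v <+: u := by
    have h0 : v.reverse <:+ u.reverse := by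
      rw [hv, List.reverse_reverse]; exact List.dropWhile_suffix p
    exact List.reverse_suffix.mp h0
  have hlv : List.dropWhile p v = v := by
    cases hvv : v with
    | nil => simp
    | cons a t =>
      obtain ⟨w, hw⟩ := hvu
      rw [hvv] at hw
      have hpa : p a = false := by
        apply pv_dropWhile_eq_self (l := t ++ w)
        rw [← List.cons_append, hw]
        exact hud
      rw [List.dropWhile_cons, if_neg (by simp [hpa])]
  rw [hlv]
  have : List.dropWhile p v.reverse = v.reverse := by
    rw [hv, List.reverse_reverse]; exact pv_dropWhile_idem p u.reverse
  rw [this, hv, List.reverse_reverse]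

theorem pv_str_strip_idem (s : String) : PySem.Str.strip (PySem.Str.strip s) = PySem.Str.strip s := by
  apply String.ext
  rw [PySem.Str.toList_strip, PySem.Str.toList_strip, pv_strip_idem]

theorem pv_chunk_strip (t : String) : pvChunk (PySem.Str.strip t) = pvChunk t := by
  unfold pvChunk
  rw [pv_str_strip_idem]

theorem pv_split_str (s : String) (sep : String) (hsep : sep.toList ≠ []) :
    ∃ ts : List String, PySem.Str.split? s sep = some ts ∧ ts.map String.toList = PySem.Chars.splitOn s.toList sep.toList := by
  have h := PySem.Str.split?_map s sep
  cases hs : PySem.Str.split? s sep with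
  | none =>
    rw [hs] at h
    simp only [Option.map_none] at h
    unfold PySem.Chars.split? at h
    rw [if_neg (by simpa [List.isEmpty_iff] using hsep)] at h
    exact absurd h.symm (by simp)
  | some ts =>
    refine ⟨ts, rfl, ?_⟩
    rw [hs] at h
    simp only [Option.map_some] at h
    unfold PySem.Chars.split? at h
    rw [if_neg (by simpa [List.isEmpty_iff] using hsep)] at h
    simpa using h

theorem pv_split_no_comma {s : String} (h : ',' ∉ s.toList) : PySem.Str.split? s "," = some [s] := by
  obtain ⟨ts, hts, hmap⟩ := pv_split_str s "," (by decide)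
  rw [hts]
  have : PySem.Chars.splitOn s.toList (",".toList) = [s.toList] := by
    have : (",".toList) = [','] := by decide
    rw [this]; exact pv_splitOn_no_occ h
  rw [this] at hmap
  cases ts with
  | nil => simp at hmap
  | cons a t =>
    cases t with
    | nil =>
      simp only [List.map_cons, List.map_nil, List.cons.injEq, and_true] at hmap
      rw [String.ext hmap]
    | cons b u => simp at hmap

theorem pv_flatten_map_singleton (f : Int → String) (l : List Int) :
    (l.map (fun x => [f x])).flatten = l.map f := by
  induction l with
  | nil => rfl
  | cons a t ih => simp [ih]

-- A's per-term computation equals B's, whenever the stripped argument contains no comma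
theorem pv_goA_eq_chunk (fuel : Nat) (t : String)
    (h : ¬ ([','] <:+: (PySem.Str.strip t).toList)) : pvGoA (fuel + 1) t = pvChunk t := by
  rw [pvGoA]
  simp only [pvChunk]
  rw [if_neg (by
    intro hfind
    apply h
    have := (pv_find_pos_iff (PySem.Str.strip t) ",").mp hfind
    simpa using this)]
  have hdash : (PySem.Str.find (PySem.Str.strip t) "-" > -1) = (PySem.Str.isIn "-" (PySem.Str.strip t) = true) := by
    apply propext
    rw [pv_find_pos_iff, PySem.Str.isIn_iff_infix]
  by_cases hd : PySem.Str.isIn "-" (PySem.Str.strip t) = true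
  · rw [if_pos (by rw [hdash]; exact hd), if_pos hd]
    cases hsp : (PySem.Str.split? (PySem.Str.strip t) "-").getD [] with
    | nil => rfl
    | cons a u =>
      cases u with
      | nil => rfl
      | cons b w =>
        cases w with
        | nil =>
          cases ha : PySem.Int.ofStr? a <;> cases hb : PySem.Int.ofStr? b <;>
            simp [ha, hb, pv_flatten_map_singleton]
        | cons c v => rfl
  · rw [if_neg (by rw [hdash]; exact hd), if_neg hd]

theorem pv_body_eq (operations : List String) (t : String) :
    (let term := PySem.Str.strip t
     if PySem.Str.isIn "-" term then
       match (PySem.Str.split? term "-").getD [] with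
       | [sstart, send] =>
         match PySem.Int.ofStr? sstart, PySem.Int.ofStr? send with
         | some istart, some iend =>
           operations ++ (PySem.List.pyRange istart (iend + 1) 1).map PySem.Int.toStr
         | _, _ => operations
       | _ => operations
     else operations ++ [term]) = operations ++ pvChunk t := by
  simp only [pvChunk]
  by_cases hd : PySem.Str.isIn "-" (PySem.Str.strip t) = true
  · rw [if_pos hd, if_pos hd]
    cases (PySem.Str.split? (PySem.Str.strip t) "-").getD [] with
    | nil => simp
    | cons a u =>
      cases u with
      | nil => simp
      | cons b w =>
        cases w with
        | nil =>
          cases ha : PySem.Int.ofStr? a <;> cases hb : PySem.Int.ofStr? b <;> simp [ha, hb]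
        | cons c v => simp
  · rw [if_neg hd, if_neg hd]

theorem pv_alt_eq_flatMap (expression : String) :
    parseOperationSubExpression_py_alt expression =
      ((PySem.Str.split? (PySem.Str.strip expression) ",").getD []).flatMap pvChunk := by
  unfold parseOperationSubExpression_py_alt
  have hfun : (fun (operations : List String) (t : String) =>
      let term := PySem.Str.strip t
      if PySem.Str.isIn "-" term then
        match (PySem.Str.split? term "-").getD [] with
        | [sstart, send] =>
          match PySem.Int.ofStr? sstart, PySem.Int.ofStr? send with
          | some istart, some iend =>
            operations ++ (PySem.List.pyRange istart (iend + 1) 1).map PySem.Int.toStr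
          | _, _ => operations
        | _ => operations
      else operations ++ [term]) = (fun operations t => operations ++ pvChunk t) := by
    funext operations t
    exact pv_body_eq operations t
  rw [hfun, PySem.List.foldl_append_eq_flatMap]
  simp

-- ===== VERDICT (by name: the statement is the Claim_ definition above) =====
theorem parseOperationSubExpression_py_spec : Claim_equal_parseOperationSubExpression_py := by
  unfold Claim_equal_parseOperationSubExpression_py
  intro expression _ _
  unfold Spec_parseOperationSubExpression_py
  unfold parseOperationSubExpression_py
  rw [pv_alt_eq_flatMap]
  by_cases hc : [','] <:+: (PySem.Str.strip expression).toList
  · -- comma branch: A recurses on the comma pieces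
    rw [pvGoA]
    rw [if_pos (by rw [pv_find_pos_iff]; simpa using hc)]
    obtain ⟨ts, hts, hmap⟩ := pv_split_str (PySem.Str.strip expression) "," (by decide)
    rw [hts]
    simp only [Option.getD_some]
    rw [PySem.List.foldl_append_eq_flatMap]
    simp only [List.nil_append]
    apply List.flatMap_congr
    intro t ht
    have hmem : t.toList ∈ PySem.Chars.splitOn (PySem.Str.strip expression).toList (",".toList) := by
      rw [← hmap]; exact List.mem_map_of_mem ht
    have hcomma : ',' ∉ t.toList := by
      have : (",".toList) = [','] := by decide
      rw [this] at hmem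
      exact pv_splitOn_not_mem hmem
    apply pv_goA_eq_chunk
    rw [pv_singleton_infix_iff]
    intro habs
    exact hcomma ((pv_strip_sublist t.toList).subset (by rwa [PySem.Str.toList_strip] at habs))
  · -- no comma: A's elif/else, B's loop runs once on the whole stripped string
    have hnc : ',' ∉ (PySem.Str.strip expression).toList := by
      rw [← pv_singleton_infix_iff]; exact hc
    rw [pv_split_no_comma hnc]
    simp only [Option.getD_some, List.flatMap_cons, List.flatMap_nil, List.append_nil]
    rw [pv_chunk_strip]
    exact pv_goA_eq_chunk 1 expression hc
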